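-- pv_equiv track=rewrite | github.com/FadiSaif-BA/Transliteration-Model | src/features/word_splitter.py | _split_preserving_al
-- ===== SOURCE A (Python) =====
-- from typing import List, Tuple, Optional
--
-- def _split_preserving_al(text: str) -> List[str]:
--     """Split on '-' but keep Al- prefix attached.
--
--     Al-Bara-Al-Kadf -> ['Al-Bara', 'Al-Kadf']
--     Wadi-Al-Bir -> ['Wadi', 'Al-Bir']
--     Al-Sawerah-Jahmh -> ['Al-Sawerah', 'Jahmh']
--     """
--     # Define Al- patterns to preserve (case insensitive)
--     al_patterns = ['Al-', 'al-', 'An-', 'an-', 'As-', 'as-',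
--                    'At-', 'at-', 'Ad-', 'ad-', 'Ar-', 'ar-']
--
--     # First, temporarily replace Al- patterns to protect them
--     protected = text
--     placeholder = '\x00AL\x00'  # Temporary placeholder
--     for pattern in al_patterns:
--         protected = protected.replace(pattern, placeholder + pattern[:-1] + '\x01')
--
--     # Now split on remaining '-'
--     parts = protected.split('-')
--
--     # Restore Al- patterns
--     result = []
--     for part in parts:
--         if not part.strip():
--             continue
--         # Restore the Al- prefix
--         restored = part.replace(placeholder, '').replace('\x01', '-')
--         result.append(restored)
--
--     return result
-- ===== SOURCE B (Python) =====
-- def _split_preserving_al(text):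
--     """Single left-to-right scan: split at a dash unless it completes a protected
--     stem (Al/An/As/At/Ad/Ar in either case), which is consumed with its dash."""
--     stems = ('Al', 'al', 'An', 'an', 'As', 'as',
--              'At', 'at', 'Ad', 'ad', 'Ar', 'ar')
--     parts = []
--     cur = []
--     i, n = 0, len(text)
--     while i < n:
--         if text[i:i + 2] in stems and i + 2 < n and text[i + 2] == '-':
--             cur += text[i:i + 3]
--             i += 3
--         elif text[i] == '-':
--             parts.append(''.join(cur))
--             cur = []
--             i += 1
--         else:
--             cur.append(text[i])
--             i += 1
--     parts.append(''.join(cur))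
--     return [p for p in parts if p.strip()]
-- ===== Notes on version B (the rewrite author's own statement) =====
-- stated objective: simpler
-- what changed: Replaces A's 12 sequential placeholder-replace passes followed by a dash split and per-part placeholder restoration with a single left-to-right scan that splits directly at each dash not completing a protected stem (Al/An/As/At/Ad/Ar in either case), needing no placeholders or restoration.
import Mathlib
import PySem

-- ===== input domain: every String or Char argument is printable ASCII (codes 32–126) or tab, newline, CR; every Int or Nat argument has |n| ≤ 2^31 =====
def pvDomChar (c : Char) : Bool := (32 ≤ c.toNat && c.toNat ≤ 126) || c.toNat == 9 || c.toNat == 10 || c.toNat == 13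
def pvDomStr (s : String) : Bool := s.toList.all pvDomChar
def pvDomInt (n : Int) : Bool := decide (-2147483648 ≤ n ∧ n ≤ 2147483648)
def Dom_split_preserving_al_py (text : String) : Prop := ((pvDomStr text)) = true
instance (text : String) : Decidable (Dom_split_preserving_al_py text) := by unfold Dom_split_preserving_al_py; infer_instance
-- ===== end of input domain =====

-- B replaces A's 12 placeholder-replace passes + split + restore by one direct
-- left-to-right scan that splits at a dash unless it completes a protected stem
-- (simpler; same result).

-- ===== PORT A =====

-- the 12 'Al-' style patterns, in A's order
def pvPatterns : List (List Char) :=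
  [['A','l','-'], ['a','l','-'], ['A','n','-'], ['a','n','-'], ['A','s','-'], ['a','s','-'],
   ['A','t','-'], ['a','t','-'], ['A','d','-'], ['a','d','-'], ['A','r','-'], ['a','r','-']]

-- '\x00AL\x00' placeholder
def pvPlaceholder : List Char := ['\x00', 'A', 'L', '\x00']

-- literal port of A: protect with placeholders, split on '-', filter, restore
def split_preserving_al_py (text : String) : List String :=
  let protected_ := pvPatterns.foldl
    (fun s pattern => PySem.Chars.replace s pattern
      (pvPlaceholder ++ PySem.Chars.slice pattern none (some (-1)) ++ ['\x01'])) text.toList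
  let parts := PySem.Chars.splitOn protected_ ['-']
  let result := parts.foldl
    (fun res part =>
      if (PySem.Chars.strip part).isEmpty then res
      else res ++ [PySem.Chars.replace (PySem.Chars.replace part pvPlaceholder []) ['\x01'] ['-']])
    ([] : List (List Char))
  result.map String.ofList

-- ===== PORT B =====

-- the 12 protected stems, in Source B's order
def pvStems : List (List Char) :=
  [['A','l'], ['a','l'], ['A','n'], ['a','n'], ['A','s'], ['a','s'],
   ['A','t'], ['a','t'], ['A','d'], ['a','d'], ['A','r'], ['a','r']]

-- Source B's while loop: lookahead scan (the length-<3 cases are the bound checks)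
def pvAltScan : List Char → List Char → List (List Char)
  | cur, [] => [cur]
  | cur, [a] => if a = '-' then cur :: pvAltScan [] [] else pvAltScan (cur ++ [a]) []
  | cur, [a, b] => if a = '-' then cur :: pvAltScan [] [b] else pvAltScan (cur ++ [a]) [b]
  | cur, a :: b :: c :: r =>
      if [a, b] ∈ pvStems ∧ c = '-' then pvAltScan (cur ++ [a, b, c]) r
      else if a = '-' then cur :: pvAltScan [] (b :: c :: r)
      else pvAltScan (cur ++ [a]) (b :: c :: r)

def split_preserving_al_py_alt (text : String) : List String :=
  ((pvAltScan [] text.toList).filter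
    (fun p => !(PySem.Chars.strip p).isEmpty)).map String.ofList

-- ===== PRECONDITION & SPEC =====
def Spec_split_preserving_al_py (text : String) (out : List String) : Prop := out = split_preserving_al_py_alt text
instance (text : String) (out : List String) : Decidable (Spec_split_preserving_al_py text out) := by unfold Spec_split_preserving_al_py; infer_instance

-- ===== CLAIM (what is proved, stated in full; the proofs are below) =====
def Claim_equal_split_preserving_al_py : Prop := ∀ (text : String), Dom_split_preserving_al_py text → Spec_split_preserving_al_py text (split_preserving_al_py text)

-- ===== LEMMAS AND PROOFS =====

-- clean = char can occur in a Dom string (no '\x00' / '\x01')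
def pvClean (cs : List Char) : Prop := ∀ c ∈ cs, c ≠ '\x00' ∧ c ≠ '\x01'

-- the protected marker that A's replacement produces for stem [x,y]
def pvMark (x y : Char) : List Char := ['\x00', 'A', 'L', '\x00', x, y, '\x01']

-- result of A's first k replace passes (P = stems already processed)
def pvEnc (P : List (List Char)) : List Char → List Char
  | [] => []
  | [a] => a :: pvEnc P []
  | [a, b] => a :: pvEnc P [b]
  | a :: b :: c :: r =>
      if [a, b] ∈ P ∧ c = '-' then pvMark a b ++ pvEnc P r
      else a :: pvEnc P (b :: c :: r)

-- pvEnc with marks decoded half-way ('\x00AL\x00' already deleted)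
def pvSub : List Char → List Char
  | [] => []
  | [a] => a :: pvSub []
  | [a, b] => a :: pvSub [b]
  | a :: b :: c :: r =>
      if [a, b] ∈ pvStems ∧ c = '-' then a :: b :: '\x01' :: pvSub r
      else a :: pvSub (b :: c :: r)

-- fuel-indexed reformulations of PySem.Chars.replace / splitOn (accumulator removed)
def pvRepAux (old new : List Char) : Nat → List Char → List Char
  | 0, l => l
  | _ + 1, [] => []
  | fuel + 1, c :: t =>
      if old.isPrefixOf (c :: t) then new ++ pvRepAux old new fuel (List.drop old.length (c :: t))
      else c :: pvRepAux old new fuel t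

def pvSplAux : Nat → List Char → List Char → List (List Char)
  | 0, l, cur => [cur ++ l]
  | _ + 1, [], cur => [cur]
  | fuel + 1, c :: rest, cur =>
      if c = '-' then cur :: pvSplAux fuel rest [] else pvSplAux fuel rest (cur ++ [c])

-- clean recursive form of splitOn · ['-']
def pvSpl : List Char → List (List Char)
  | [] => [[]]
  | c :: t => if c = '-' then [] :: pvSpl t else (c :: (pvSpl t).headI) :: (pvSpl t).tail

lemma pv_stem_facts : ∀ x y, [x, y] ∈ pvStems →
    x ≠ '\x00' ∧ x ≠ '\x01' ∧ x ≠ '-' ∧ y ≠ '\x00' ∧ y ≠ '\x01' ∧ y ≠ '-' ∧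
    PySem.Chars.isspace x = false ∧ PySem.Chars.isspace y = false := by
  intro x y h
  fin_cases h <;>
    refine ⟨by decide, by decide, by decide, by decide, by decide, by decide, by decide, by decide⟩

-- replace machinery
lemma pv_rep_go (old new : List Char) :
    ∀ fuel l acc, PySem.Chars.replace.go old new fuel l acc = acc.reverse ++ pvRepAux old new fuel l := by
  intro fuel
  induction fuel with
  | zero => intro l acc; rw [PySem.Chars.replace.go.eq_def]; cases l <;> simp [pvRepAux]
  | succ n ih =>
    intro l acc
    rw [PySem.Chars.replace.go.eq_def]
    cases l with
    | nil => simp [pvRepAux]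
    | cons c t =>
      simp only [pvRepAux]
      split
      · rw [ih]; simp
      · rw [ih]; simp

lemma pv_replace_eq (old new : List Char) (h : old ≠ []) (s : List Char) :
    PySem.Chars.replace s old new = pvRepAux old new s.length s := by
  rw [PySem.Chars.replace, if_neg (by simpa using h), pv_rep_go]; simp

lemma pv_repAux_fuel (old new : List Char) (h : old ≠ []) :
    ∀ f f' l, l.length ≤ f → l.length ≤ f' → pvRepAux old new f l = pvRepAux old new f' l := by
  intro f
  induction f with
  | zero =>
    intro f' l hf hf'
    have : l = [] := by cases l <;> simp_all
    subst this; cases f' <;> simp [pvRepAux]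
  | succ n ih =>
    intro f' l hf hf'
    cases l with
    | nil => cases f' <;> simp [pvRepAux]
    | cons c t =>
      cases f' with
      | zero => simp at hf'
      | succ m =>
        simp only [pvRepAux]
        split
        · congr 1
          apply ih
          · have hol : 1 ≤ old.length := by cases old <;> simp_all
            simp only [List.length_drop, List.length_cons] at *
            omega
          · have hol : 1 ≤ old.length := by cases old <;> simp_all
            simp only [List.length_drop, List.length_cons] at *
            omega
        · congr 1
          apply ih <;> simp_all

lemma pv_replace_nil (old new : List Char) (h : old ≠ []) :
    PySem.Chars.replace [] old new = [] := by
  rw [pv_replace_eq old new h]; simp [pvRepAux]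

lemma pv_replace_pos (old new s : List Char) (h : old ≠ []) (hp : old.isPrefixOf s = true) (hs : s ≠ []) :
    PySem.Chars.replace s old new = new ++ PySem.Chars.replace (s.drop old.length) old new := by
  obtain ⟨c, t, rfl⟩ : ∃ c t, s = c :: t := by
    cases s with
    | nil => exact absurd rfl hs
    | cons c t => exact ⟨c, t, rfl⟩
  rw [pv_replace_eq old new h, pv_replace_eq old new h]
  simp only [List.length_cons, pvRepAux, hp, if_true]
  congr 1
  apply pv_repAux_fuel old new h
  · have hol : 1 ≤ old.length := by cases old <;> simp_all
    simp only [List.length_drop, List.length_cons]; omega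
  · simp

lemma pv_replace_neg (old new : List Char) (c : Char) (t : List Char)
    (h : old ≠ []) (hp : old.isPrefixOf (c :: t) = false) :
    PySem.Chars.replace (c :: t) old new = c :: PySem.Chars.replace t old new := by
  rw [pv_replace_eq old new h, pv_replace_eq old new h]
  simp only [List.length_cons, pvRepAux, hp]
  simp

-- prefix computations for 3-char patterns and the placeholder
lemma pv_np1 (x y c₁ : Char) (s : List Char) (h : x ≠ c₁) : ([x, y, '-']).isPrefixOf (c₁ :: s) = false := by
  simp [List.isPrefixOf, h]
lemma pv_np2 (x y c₁ c₂ : Char) (s : List Char) (h : y ≠ c₂) : ([x, y, '-']).isPrefixOf (c₁ :: c₂ :: s) = false := by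
  simp [List.isPrefixOf, h]
lemma pv_np3 (x y c₁ c₂ c₃ : Char) (s : List Char) (h : c₃ ≠ '-') : ([x, y, '-']).isPrefixOf (c₁ :: c₂ :: c₃ :: s) = false := by
  simp [List.isPrefixOf]
  intro _ _ h'
  exact absurd h'.symm h
lemma pv_npshort1 (x y c₁ : Char) : ([x, y, '-']).isPrefixOf [c₁] = false := by
  simp [List.isPrefixOf]
lemma pv_npshort2 (x y c₁ c₂ : Char) : ([x, y, '-']).isPrefixOf [c₁, c₂] = false := by
  simp [List.isPrefixOf]

lemma pv_pos3 (x y : Char) (s : List Char) : ([x, y, '-']).isPrefixOf (x :: y :: '-' :: s) = true := by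
  simp [List.isPrefixOf]
lemma pv_npPH (d : Char) (s : List Char) (h : d ≠ '\x00') : pvPlaceholder.isPrefixOf (d :: s) = false := by
  simp [pvPlaceholder, List.isPrefixOf]
  intro h'
  exact absurd h'.symm h
lemma pv_npSOH (d : Char) (s : List Char) (h : d ≠ '\x01') : (['\x01']).isPrefixOf (d :: s) = false := by
  simp [List.isPrefixOf]
  exact fun h' => absurd h'.symm h

-- pvEnc small-step equations
lemma pv_enc_one (P : List (List Char)) (a : Char) : pvEnc P [a] = [a] := by simp [pvEnc]
lemma pv_enc_two (P : List (List Char)) (a b : Char) : pvEnc P [a, b] = [a, b] := by simp [pvEnc]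
lemma pv_enc_pos (P : List (List Char)) (a b : Char) (r : List Char) (h : [a, b] ∈ P) :
    pvEnc P (a :: b :: '-' :: r) = pvMark a b ++ pvEnc P r := by simp [pvEnc, h]
lemma pv_enc_neg (P : List (List Char)) (a b c : Char) (r : List Char) (h : ¬([a, b] ∈ P ∧ c = '-')) :
    pvEnc P (a :: b :: c :: r) = a :: pvEnc P (b :: c :: r) := by simp [pvEnc, h]
lemma pv_enc_nilP (cs : List Char) : pvEnc [] cs = cs := by
  induction cs using pvEnc.induct (P := []) with
  | case1 => simp [pvEnc]
  | case2 a => simp [pvEnc]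
  | case3 a b => simp [pvEnc]
  | case4 a b c r h ih => simp at h
  | case5 a b c r h ih => simp [pvEnc, ih]

-- head of pvEnc output is NUL (a mark) or the original head
lemma pv_enc_head (P : List (List Char)) (a : Char) (rest : List Char) :
    (∃ s, pvEnc P (a :: rest) = '\x00' :: s) ∨ (∃ s, pvEnc P (a :: rest) = a :: s) := by
  match rest with
  | [] => right; exact ⟨[], by simp [pvEnc]⟩
  | [b] => right; exact ⟨[b], by simp [pvEnc]⟩
  | b :: c :: r =>
    by_cases h : [a, b] ∈ P ∧ c = '-'
    · left
      exact ⟨'A' :: 'L' :: '\x00' :: a :: b :: '\x01' :: pvEnc P r, by simp [pvEnc, h, pvMark]⟩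
    · right
      exact ⟨pvEnc P (b :: c :: r), by simp [pvEnc, h]⟩

lemma pv_enc_dash (P : List (List Char)) (hP : ∀ p ∈ P, p ∈ pvStems) (r : List Char) :
    pvEnc P ('-' :: r) = '-' :: pvEnc P r := by
  match r with
  | [] => simp [pvEnc]
  | [d] => simp [pvEnc]
  | d :: e :: r₂ =>
    have : ¬(['-', d] ∈ P ∧ e = '-') := by
      rintro ⟨hm, -⟩
      exact (pv_stem_facts _ _ (hP _ hm)).2.2.1 rfl
    rw [pv_enc_neg _ _ _ _ _ this]

lemma pv_enc_bdash (P : List (List Char)) (hP : ∀ p ∈ P, p ∈ pvStems) (b : Char) (r : List Char) :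
    pvEnc P (b :: '-' :: r) = b :: pvEnc P ('-' :: r) := by
  match r with
  | [] => simp [pvEnc]
  | d :: r₂ =>
    have : ¬([b, '-'] ∈ P ∧ d = '-') := by
      rintro ⟨hm, -⟩
      exact (pv_stem_facts _ _ (hP _ hm)).2.2.2.2.2.1 rfl
    rw [pv_enc_neg _ _ _ _ _ this]

-- replace passes over a mark unchanged
lemma pv_replace_mark (x y a b : Char) (hxy : [x, y] ∈ pvStems) (repl s : List Char) :
    PySem.Chars.replace (pvMark a b ++ s) [x, y, '-'] repl
      = pvMark a b ++ PySem.Chars.replace s [x, y, '-'] repl := by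
  obtain ⟨hx0, hx1, hx2, hy0, hy1, hy2, -, -⟩ := pv_stem_facts x y hxy
  have hne : ([x, y, '-'] : List Char) ≠ [] := by simp
  show PySem.Chars.replace ('\x00' :: 'A' :: 'L' :: '\x00' :: a :: b :: '\x01' :: s) _ _ = _
  rw [pv_replace_neg _ _ _ _ hne (pv_np1 _ _ _ _ hx0)]
  rw [pv_replace_neg _ _ _ _ hne (pv_np3 _ _ _ _ _ _ (by decide))]
  rw [pv_replace_neg _ _ _ _ hne (pv_np2 _ _ _ _ _ hy0)]
  rw [pv_replace_neg _ _ _ _ hne (pv_np1 _ _ _ _ hx0)]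
  rw [pv_replace_neg _ _ _ _ hne (pv_np3 _ _ _ _ _ _ (by decide))]
  rw [pv_replace_neg _ _ _ _ hne (pv_np2 _ _ _ _ _ hy1)]
  rw [pv_replace_neg _ _ _ _ hne (pv_np1 _ _ _ _ hx1)]
  simp [pvMark]

-- KEY: one replace pass turns pvEnc P into pvEnc (P ++ [[x,y]])
lemma pv_key (x y : Char) (hxy : [x, y] ∈ pvStems) (P : List (List Char)) (hP : ∀ p ∈ P, p ∈ pvStems) :
    ∀ cs : List Char, pvClean cs →
      PySem.Chars.replace (pvEnc P cs) [x, y, '-'] (pvMark x y) = pvEnc (P ++ [[x, y]]) cs := by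
  obtain ⟨hx0, hx1, hx2, hy0, hy1, hy2, -, -⟩ := pv_stem_facts x y hxy
  have hne : ([x, y, '-'] : List Char) ≠ [] := by simp
  have hP' : ∀ p ∈ P ++ [[x, y]], p ∈ pvStems := by
    intro p hp
    rcases List.mem_append.1 hp with h | h
    · exact hP _ h
    · simp at h; subst h; exact hxy
  intro cs
  induction hlen : cs.length using Nat.strong_induction_on generalizing cs with
  | _ n IH =>
    intro hcl
    match cs, hlen with
    | [], hlen => simp [pvEnc, pv_replace_nil _ _ hne]
    | [a], hlen =>
      rw [pv_enc_one, pv_enc_one, pv_replace_neg _ _ _ _ hne (pv_npshort1 _ _ _),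
        pv_replace_nil _ _ hne]
    | [a, b], hlen =>
      rw [pv_enc_two, pv_enc_two, pv_replace_neg _ _ _ _ hne (pv_npshort2 _ _ _ _),
        pv_replace_neg _ _ _ _ hne (pv_npshort1 _ _ _), pv_replace_nil _ _ hne]
    | a :: b :: c :: r, hlen =>
      have hlr : r.length + 3 = n := by simpa using hlen
      have hcl3 : pvClean (b :: c :: r) := fun d hd => hcl d (List.mem_cons_of_mem _ hd)
      have hclr : pvClean r := fun d hd => hcl d (by simp [hd])
      by_cases hc : c = '-'
      · subst hc
        by_cases hm : [a, b] ∈ P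
        · rw [pv_enc_pos _ _ _ _ hm, pv_enc_pos _ _ _ _ (List.mem_append_left _ hm),
            pv_replace_mark x y a b hxy]
          congr 1
          exact IH r.length (by omega) r rfl hclr
        · by_cases hax : a = x ∧ b = y
          · obtain ⟨rfl, rfl⟩ := hax
            rw [pv_enc_neg _ _ _ _ _ (by simp [hm]), pv_enc_bdash P hP, pv_enc_dash P hP,
              pv_replace_pos _ _ _ hne (pv_pos3 _ _ _) (by simp)]
            simp only [List.drop_succ_cons, List.drop_zero, List.length_cons, List.length_nil]
            rw [pv_enc_pos _ _ _ _ (by simp : [a, b] ∈ P ++ [[a, b]])]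
            congr 1
            exact IH r.length (by omega) r rfl hclr
          · have hnp : ([x, y, '-']).isPrefixOf (a :: b :: '-' :: pvEnc P r) = false := by
              simp only [List.isPrefixOf, Bool.and_eq_false_iff]
              by_cases h1 : x = a
              · subst h1
                right
                have : ¬ y = b := fun h => hax ⟨rfl, h.symm⟩
                simp [this]
              · left; simp [h1]
            rw [pv_enc_neg _ _ _ _ _ (by simp [hm]), pv_enc_bdash P hP, pv_enc_dash P hP,
              pv_enc_neg _ _ _ _ _ (by
                simp only [List.mem_append, List.mem_singleton, List.cons.injEq]
                rintro ⟨(h | h), -⟩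
                · exact hm h
                · exact hax ⟨h.1, h.2.1⟩),
              pv_enc_bdash _ hP', pv_enc_dash _ hP',
              pv_replace_neg _ _ _ _ hne hnp,
              pv_replace_neg _ _ _ _ hne (pv_np2 _ _ _ _ _ hy2),
              pv_replace_neg _ _ _ _ hne (pv_np1 _ _ _ _ hx2),
              IH r.length (by omega) r rfl hclr]
      · have hg : ¬([a, b] ∈ P ∧ c = '-') := fun h => hc h.2
        have hg' : ¬([a, b] ∈ P ++ [[x, y]] ∧ c = '-') := fun h => hc h.2
        rw [pv_enc_neg _ _ _ _ _ hg, pv_enc_neg _ _ _ _ _ hg']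
        have hnp : ([x, y, '-']).isPrefixOf (a :: pvEnc P (b :: c :: r)) = false := by
          match r with
          | [] =>
            rw [pv_enc_two]
            exact pv_np3 _ _ _ _ _ _ hc
          | d :: r₂ =>
            by_cases g2 : [b, c] ∈ P ∧ d = '-'
            · obtain ⟨g2m, rfl⟩ := g2
              rw [pv_enc_pos _ _ _ _ g2m]
              exact pv_np2 _ _ _ _ _ hy0
            · rw [pv_enc_neg _ _ _ _ _ g2]
              rcases pv_enc_head P c (d :: r₂) with ⟨s', hs'⟩ | ⟨s', hs'⟩
              · rw [hs']; exact pv_np3 _ _ _ _ _ _ (by decide)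
              · rw [hs']; exact pv_np3 _ _ _ _ _ _ hc
        rw [pv_replace_neg _ _ _ _ hne hnp]
        congr 1
        exact IH (b :: c :: r).length (by simp; omega) _ rfl hcl3

-- CHAIN: A's 12 replace passes = pvEnc pvStems
lemma pv_chain (cs : List Char) (hc : pvClean cs) :
    pvPatterns.foldl
      (fun s pattern => PySem.Chars.replace s pattern
        (pvPlaceholder ++ PySem.Chars.slice pattern none (some (-1)) ++ ['\x01'])) cs
      = pvEnc pvStems cs := by
  have hr : ∀ (u v : Char), pvPlaceholder ++ PySem.Chars.slice [u, v, '-'] none (some (-1)) ++ ['\x01'] = pvMark u v := by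
    intro u v
    simp [pvPlaceholder, pvMark, PySem.Chars.slice_eq_listSlice, PySem.List.slice_to_neg_one]
  simp only [pvPatterns, List.foldl_cons, List.foldl_nil, hr]
  have e1 := pv_key 'A' 'l' (by decide) [] (by decide) cs hc
  simp only [List.nil_append] at e1
  rw [pv_enc_nilP] at e1
  have e2 := pv_key 'a' 'l' (by decide) [['A','l']] (by decide) cs hc
  simp only [List.cons_append, List.nil_append] at e2
  have e3 := pv_key 'A' 'n' (by decide) [['A','l'], ['a','l']] (by decide) cs hc
  simp only [List.cons_append, List.nil_append] at e3
  have e4 := pv_key 'a' 'n' (by decide) [['A','l'], ['a','l'], ['A','n']] (by decide) cs hc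
  simp only [List.cons_append, List.nil_append] at e4
  have e5 := pv_key 'A' 's' (by decide) [['A','l'], ['a','l'], ['A','n'], ['a','n']] (by decide) cs hc
  simp only [List.cons_append, List.nil_append] at e5
  have e6 := pv_key 'a' 's' (by decide) [['A','l'], ['a','l'], ['A','n'], ['a','n'], ['A','s']] (by decide) cs hc
  simp only [List.cons_append, List.nil_append] at e6
  have e7 := pv_key 'A' 't' (by decide) [['A','l'], ['a','l'], ['A','n'], ['a','n'], ['A','s'], ['a','s']] (by decide) cs hc
  simp only [List.cons_append, List.nil_append] at e7
  have e8 := pv_key 'a' 't' (by decide) [['A','l'], ['a','l'], ['A','n'], ['a','n'], ['A','s'], ['a','s'], ['A','t']] (by decide) cs hc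
  simp only [List.cons_append, List.nil_append] at e8
  have e9 := pv_key 'A' 'd' (by decide) [['A','l'], ['a','l'], ['A','n'], ['a','n'], ['A','s'], ['a','s'], ['A','t'], ['a','t']] (by decide) cs hc
  simp only [List.cons_append, List.nil_append] at e9
  have e10 := pv_key 'a' 'd' (by decide) [['A','l'], ['a','l'], ['A','n'], ['a','n'], ['A','s'], ['a','s'], ['A','t'], ['a','t'], ['A','d']] (by decide) cs hc
  simp only [List.cons_append, List.nil_append] at e10
  have e11 := pv_key 'A' 'r' (by decide) [['A','l'], ['a','l'], ['A','n'], ['a','n'], ['A','s'], ['a','s'], ['A','t'], ['a','t'], ['A','d'], ['a','d']] (by decide) cs hc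
  simp only [List.cons_append, List.nil_append] at e11
  have e12 := pv_key 'a' 'r' (by decide) [['A','l'], ['a','l'], ['A','n'], ['a','n'], ['A','s'], ['a','s'], ['A','t'], ['a','t'], ['A','d'], ['a','d'], ['A','r']] (by decide) cs hc
  simp only [List.cons_append, List.nil_append] at e12
  rw [e1, e2, e3, e4, e5, e6, e7, e8, e9, e10, e11, e12]
  simp only [pvStems]

-- splitOn machinery
lemma pv_spl_go : ∀ fuel l cur acc,
    PySem.Chars.splitOn.go ['-'] fuel l cur acc = acc.reverse ++ pvSplAux fuel l cur.reverse := by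
  intro fuel
  induction fuel with
  | zero => intro l cur acc; rw [PySem.Chars.splitOn.go.eq_def]; cases l <;> simp [pvSplAux]
  | succ n ih =>
    intro l cur acc
    rw [PySem.Chars.splitOn.go.eq_def]
    cases l with
    | nil => simp [pvSplAux]
    | cons c rest =>
      by_cases hc : c = '-'
      · subst hc
        have hpre : (['-'] : List Char).isPrefixOf ('-' :: rest) = true := by simp [List.isPrefixOf]
        simp only [hpre, if_true, List.length_singleton, List.drop_succ_cons, List.drop_zero, ih,
          pvSplAux]
        simp
      · have hpre : (['-'] : List Char).isPrefixOf (c :: rest) = false := by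
          simp [List.isPrefixOf]
          exact fun h => absurd h.symm hc
        simp only [hpre, Bool.false_eq_true, if_false, ih, pvSplAux, if_neg hc]
        simp

lemma pv_spl_ne_nil (s : List Char) : pvSpl s ≠ [] := by
  cases s with
  | nil => simp [pvSpl]
  | cons c t => by_cases hc : c = '-' <;> simp [pvSpl, hc]

lemma pv_spl_destruct (s : List Char) : pvSpl s = (pvSpl s).headI :: (pvSpl s).tail := by
  cases h : pvSpl s with
  | nil => exact absurd h (pv_spl_ne_nil s)
  | cons a t => simp

lemma pv_splAux_eq (l : List Char) : ∀ fuel cur, l.length < fuel →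
    pvSplAux fuel l cur = (cur ++ (pvSpl l).headI) :: (pvSpl l).tail := by
  induction l with
  | nil =>
    intro fuel cur h
    cases fuel with
    | zero => omega
    | succ n => simp [pvSplAux, pvSpl]
  | cons c t ih =>
    intro fuel cur h
    cases fuel with
    | zero => omega
    | succ n =>
      by_cases hc : c = '-'
      · subst hc
        simp only [pvSplAux, pvSpl]
        rw [ih n [] (by simpa using h)]
        simp only [List.nil_append]
        rw [← pv_spl_destruct]
        simp
      · simp only [pvSplAux, if_neg hc, pvSpl]
        rw [ih n (cur ++ [c]) (by simp at h ⊢; omega)]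
        simp

lemma pv_splitOn_eq (s : List Char) : PySem.Chars.splitOn s ['-'] = pvSpl s := by
  rw [PySem.Chars.splitOn, pv_spl_go]
  simp only [List.reverse_nil, List.nil_append]
  rw [pv_splAux_eq s (s.length + 1) [] (by omega)]
  simp only [List.nil_append]
  exact (pv_spl_destruct s).symm

lemma pv_spl_cons_ne (d : Char) (s : List Char) (h : d ≠ '-') :
    pvSpl (d :: s) = (d :: (pvSpl s).headI) :: (pvSpl s).tail := by
  simp [pvSpl, h]

-- altScan facts
lemma pv_alt_eq0 (cur : List Char) : pvAltScan cur [] = [cur] := rfl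

lemma pv_alt_eq1 (cur : List Char) (a : Char) :
    pvAltScan cur [a] = if a = '-' then cur :: pvAltScan [] [] else pvAltScan (cur ++ [a]) [] := rfl

lemma pv_alt_eq2 (cur : List Char) (a b : Char) :
    pvAltScan cur [a, b] = if a = '-' then cur :: pvAltScan [] [b] else pvAltScan (cur ++ [a]) [b] := rfl

lemma pv_alt_eq3 (cur : List Char) (a b c : Char) (r : List Char) :
    pvAltScan cur (a :: b :: c :: r) =
      if [a, b] ∈ pvStems ∧ c = '-' then pvAltScan (cur ++ [a, b, c]) r
      else if a = '-' then cur :: pvAltScan [] (b :: c :: r)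
      else pvAltScan (cur ++ [a]) (b :: c :: r) := rfl

lemma pv_altScan_cur : ∀ cs cur,
    pvAltScan cur cs = (cur ++ (pvAltScan [] cs).headI) :: (pvAltScan [] cs).tail := by
  intro cs
  induction hlen : cs.length using Nat.strong_induction_on generalizing cs with
  | _ n IH =>
    intro cur
    match cs, hlen with
    | [], hlen => simp [pv_alt_eq0]
    | [a], hlen =>
      by_cases ha : a = '-' <;>
        simp only [pv_alt_eq1, ha, if_false, pv_alt_eq0] <;> simp
    | [a, b], hlen =>
      by_cases ha : a = '-'
      · simp only [pv_alt_eq2, ha, if_true]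
        simp
      · simp only [pv_alt_eq2, if_neg ha]
        rw [IH 1 (by simp at hlen; omega) [b] rfl (cur ++ [a]),
          IH 1 (by simp at hlen; omega) [b] rfl ([] ++ [a])]
        simp
    | a :: b :: c :: r, hlen =>
      have hlr : r.length + 3 = n := by simpa using hlen
      by_cases hg : [a, b] ∈ pvStems ∧ c = '-'
      · simp only [pv_alt_eq3, if_pos hg]
        rw [IH r.length (by omega) r rfl (cur ++ [a, b, c]),
          IH r.length (by omega) r rfl ([] ++ [a, b, c])]
        simp
      · by_cases ha : a = '-'
        · simp only [pv_alt_eq3, if_neg hg, if_pos ha]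
          simp
        · simp only [pv_alt_eq3, if_neg hg, if_neg ha]
          rw [IH (b :: c :: r).length (by simp; omega) (b :: c :: r) rfl (cur ++ [a]),
            IH (b :: c :: r).length (by simp; omega) (b :: c :: r) rfl ([] ++ [a])]
          simp

lemma pv_altScan_ne_nil (cur cs : List Char) : pvAltScan cur cs ≠ [] := by
  rw [pv_altScan_cur]; simp

lemma pv_alt_destruct (cur cs : List Char) :
    pvAltScan cur cs = (pvAltScan cur cs).headI :: (pvAltScan cur cs).tail := by
  cases h : pvAltScan cur cs with
  | nil => exact absurd h (pv_altScan_ne_nil cur cs)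
  | cons a t => simp

lemma pv_take_one_of_take_two {h : List Char} (hm : '-' ∈ h.take 1) : '-' ∈ h.take 2 := by
  have : h.take 1 = (h.take 2).take 1 := by rw [List.take_take]; simp
  rw [this] at hm
  exact List.take_subset _ _ hm

-- the head token of a scan never has '-' among its first two characters
lemma pv_headok : ∀ cs : List Char, '-' ∉ ((pvAltScan [] cs).headI.take 2) := by
  intro cs
  induction hlen : cs.length using Nat.strong_induction_on generalizing cs with
  | _ n IH =>
    match cs, hlen with
    | [], hlen => simp [pv_alt_eq0]
    | [a], hlen =>
      by_cases ha : a = '-'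
      · simp [pv_alt_eq1, ha, pv_alt_eq0]
      · simp [pv_alt_eq1, ha, pv_alt_eq0, List.take]
        exact fun h => absurd h.symm ha
    | [a, b], hlen =>
      by_cases ha : a = '-'
      · simp [pv_alt_eq2, ha]
      · rw [pv_alt_eq2, if_neg ha, pv_altScan_cur [b] ([] ++ [a])]
        simp only [List.nil_append, List.headI_cons, List.cons_append, List.take_succ_cons,
          List.mem_cons]
        rintro (h | h)
        · exact ha h.symm
        · exact IH 1 (by simp at hlen; omega) [b] rfl (pv_take_one_of_take_two h)
    | a :: b :: c :: r, hlen =>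
      have hlr : r.length + 3 = n := by simpa using hlen
      by_cases hg : [a, b] ∈ pvStems ∧ c = '-'
      · rw [pv_alt_eq3, if_pos hg, pv_altScan_cur r ([] ++ [a, b, c])]
        obtain ⟨-, -, ha', -, -, hb', -, -⟩ := pv_stem_facts a b hg.1
        simp only [List.nil_append, List.headI_cons, List.cons_append, List.take_succ_cons,
          List.take_zero, List.mem_cons]
        rintro (h | h | h)
        · exact ha' h.symm
        · exact hb' h.symm
        · simp at h
      · by_cases ha : a = '-'
        · rw [pv_alt_eq3, if_neg hg, if_pos ha]
          simp
        · rw [pv_alt_eq3, if_neg hg, if_neg ha, pv_altScan_cur (b :: c :: r) ([] ++ [a])]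
          simp only [List.nil_append, List.headI_cons, List.cons_append, List.take_succ_cons,
            List.mem_cons]
          rintro (h | h)
          · exact ha h.symm
          · exact IH (b :: c :: r).length (by simp; omega) _ rfl (pv_take_one_of_take_two h)

-- every character of every token comes from cur or cs
lemma pv_tok_chars (p : Char → Prop) : ∀ cs cur, (∀ c ∈ cur, p c) → (∀ c ∈ cs, p c) →
    ∀ t ∈ pvAltScan cur cs, ∀ c ∈ t, p c := by
  intro cs
  induction hlen : cs.length using Nat.strong_induction_on generalizing cs with
  | _ n IH =>
    intro cur hcur hcs t ht c hc
    match cs, hlen with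
    | [], hlen =>
      rw [pv_alt_eq0] at ht
      simp at ht
      subst ht
      exact hcur _ hc
    | [a], hlen =>
      rw [pv_alt_eq1] at ht
      by_cases ha : a = '-'
      · rw [if_pos ha, pv_alt_eq0] at ht
        simp at ht
        rcases ht with rfl | rfl
        · exact hcur _ hc
        · simp at hc
      · rw [if_neg ha, pv_alt_eq0] at ht
        simp at ht
        subst ht
        rcases List.mem_append.1 hc with h | h
        · exact hcur _ h
        · simp at h; subst h; exact hcs _ (by simp)
    | [a, b], hlen =>
      rw [pv_alt_eq2] at ht
      by_cases ha : a = '-'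
      · rw [if_pos ha] at ht
        simp only [List.mem_cons] at ht
        rcases ht with rfl | ht
        · exact hcur _ hc
        · exact IH 1 (by simp at hlen; omega) [b] rfl [] (by simp)
            (by intro d hd; simp at hd; subst hd; exact hcs _ (by simp)) t ht c hc
      · rw [if_neg ha] at ht
        exact IH 1 (by simp at hlen; omega) [b] rfl (cur ++ [a])
          (by
            intro d hd
            rcases List.mem_append.1 hd with h | h
            · exact hcur _ h
            · simp at h; subst h; exact hcs _ (by simp))
          (by intro d hd; simp at hd; subst hd; exact hcs _ (by simp)) t ht c hc
    | a :: b :: c' :: r, hlen =>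
      rw [pv_alt_eq3] at ht
      have hlr : r.length + 3 = n := by simpa using hlen
      have hcsr : ∀ d ∈ r, p d := fun d hd => hcs _ (by simp [hd])
      by_cases hg : [a, b] ∈ pvStems ∧ c' = '-'
      · rw [if_pos hg] at ht
        exact IH r.length (by omega) r rfl (cur ++ [a, b, c'])
          (by
            intro d hd
            rcases List.mem_append.1 hd with h | h
            · exact hcur _ h
            · simp at h; rcases h with rfl | rfl | rfl <;> exact hcs _ (by simp))
          hcsr t ht c hc
      · rw [if_neg hg] at ht
        have hcs3 : ∀ d ∈ b :: c' :: r, p d := fun d hd => hcs _ (by simp at hd ⊢; tauto)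
        by_cases ha : a = '-'
        · rw [if_pos ha] at ht
          simp only [List.mem_cons] at ht
          rcases ht with rfl | ht
          · exact hcur _ hc
          · exact IH (b :: c' :: r).length (by simp; omega) _ rfl [] (by simp) hcs3 t ht c hc
        · rw [if_neg ha] at ht
          exact IH (b :: c' :: r).length (by simp; omega) _ rfl (cur ++ [a])
            (by
              intro d hd
              rcases List.mem_append.1 hd with h | h
              · exact hcur _ h
              · simp at h; subst h; exact hcs _ (by simp))
            hcs3 t ht c hc

lemma pv_spl_mark (a b : Char) (ha : a ≠ '-') (hb : b ≠ '-') (X : List Char) :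
    pvSpl (pvMark a b ++ X) = (pvMark a b ++ (pvSpl X).headI) :: (pvSpl X).tail := by
  show pvSpl ('\x00' :: 'A' :: 'L' :: '\x00' :: a :: b :: '\x01' :: X) = _
  rw [pv_spl_cons_ne _ _ (by decide), pv_spl_cons_ne _ _ (by decide),
    pv_spl_cons_ne _ _ (by decide), pv_spl_cons_ne _ _ (by decide),
    pv_spl_cons_ne _ _ ha, pv_spl_cons_ne _ _ hb, pv_spl_cons_ne _ _ (by decide)]
  simp [pvMark]

lemma pv_enc_cons_of_ok (P : List (List Char)) (a : Char) (h₀ : List Char)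
    (hok : '-' ∉ h₀.take 2) : pvEnc P (a :: h₀) = a :: pvEnc P h₀ := by
  match h₀ with
  | [] => rw [pv_enc_one]; simp [pvEnc]
  | [u] => rw [pv_enc_two, pv_enc_one]
  | u :: v :: h₁ =>
    have hv : v ≠ '-' := by
      intro hv
      exact hok (by simp [hv])
    exact pv_enc_neg _ _ _ _ _ (fun h => hv h.2)

-- CORE: splitting the protected string = mapping pvEnc over B's tokens
lemma pv_core : ∀ cs : List Char,
    pvSpl (pvEnc pvStems cs) = (pvAltScan [] cs).map (pvEnc pvStems) := by
  intro cs
  induction hlen : cs.length using Nat.strong_induction_on generalizing cs with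
  | _ n IH =>
    match cs, hlen with
    | [], hlen => simp [pvEnc, pvSpl, pv_alt_eq0]
    | [a], hlen =>
      rw [pv_enc_one, pv_alt_eq1]
      by_cases ha : a = '-'
      · rw [if_pos ha, ha, pv_alt_eq0]
        simp [pvSpl, pvEnc]
      · rw [if_neg ha, pv_alt_eq0]
        simp [pvSpl, ha, pvEnc]
    | [a, b], hlen =>
      rw [pv_enc_two, pv_alt_eq2]
      by_cases ha : a = '-'
      · rw [if_pos ha, ha, pv_alt_eq1]
        by_cases hb : b = '-'
        · rw [if_pos hb, hb, pv_alt_eq0]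
          simp [pvSpl, pvEnc]
        · rw [if_neg hb, pv_alt_eq0]
          simp [pvSpl, hb, pvEnc]
      · rw [if_neg ha, pv_alt_eq1]
        by_cases hb : b = '-'
        · rw [if_pos hb, hb, pv_alt_eq0]
          simp [pvSpl, ha, pvEnc]
        · rw [if_neg hb, pv_alt_eq0]
          simp [pvSpl, ha, hb, pvEnc]
    | a :: b :: c :: r, hlen =>
      have hlr : r.length + 3 = n := by simpa using hlen
      by_cases hg : [a, b] ∈ pvStems ∧ c = '-'
      · obtain ⟨hm, rfl⟩ := hg
        obtain ⟨-, -, ha', -, -, hb', -, -⟩ := pv_stem_facts a b hm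
        rw [pv_enc_pos _ _ _ _ hm, pv_spl_mark a b ha' hb',
          IH r.length (by omega) r rfl,
          pv_alt_eq3, if_pos ⟨hm, rfl⟩, pv_altScan_cur r ([] ++ [a, b, '-'])]
        rw [pv_alt_destruct [] r]
        simp only [List.map_cons, List.headI_cons, List.tail_cons, List.nil_append,
          List.cons_append]
        rw [pv_enc_pos _ _ _ _ hm]
      · rw [pv_enc_neg _ _ _ _ _ hg, pv_alt_eq3, if_neg hg]
        by_cases ha : a = '-'
        · subst ha
          rw [if_pos rfl]
          have : pvSpl ('-' :: pvEnc pvStems (b :: c :: r)) = [] :: pvSpl (pvEnc pvStems (b :: c :: r)) := by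
            simp [pvSpl]
          rw [this, IH (b :: c :: r).length (by simp; omega) _ rfl]
          simp [pvEnc]
        · rw [if_neg ha, pv_spl_cons_ne _ _ ha, IH (b :: c :: r).length (by simp; omega) _ rfl,
            pv_altScan_cur (b :: c :: r) ([] ++ [a])]
          rw [pv_alt_destruct [] (b :: c :: r)]
          simp only [List.map_cons, List.headI_cons, List.tail_cons, List.nil_append,
            List.cons_append]
          rw [pv_enc_cons_of_ok _ _ _ (pv_headok (b :: c :: r))]

lemma pv_PH_ne : (pvPlaceholder : List Char) ≠ [] := by simp [pvPlaceholder]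

lemma pv_sub_one (a : Char) : pvSub [a] = [a] := by simp [pvSub]
lemma pv_sub_two (a b : Char) : pvSub [a, b] = [a, b] := by simp [pvSub]
lemma pv_sub_pos (a b : Char) (r : List Char) (h : [a, b] ∈ pvStems) :
    pvSub (a :: b :: '-' :: r) = a :: b :: '\x01' :: pvSub r := by simp [pvSub, h]
lemma pv_sub_neg (a b c : Char) (r : List Char) (h : ¬([a, b] ∈ pvStems ∧ c = '-')) :
    pvSub (a :: b :: c :: r) = a :: pvSub (b :: c :: r) := by simp [pvSub, h]

-- restore: replace (enc t) placeholder '' = pvSub t, then '\x01' -> '-'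
lemma pv_restore1 : ∀ t : List Char, pvClean t →
    PySem.Chars.replace (pvEnc pvStems t) pvPlaceholder [] = pvSub t := by
  intro t
  induction hlen : t.length using Nat.strong_induction_on generalizing t with
  | _ n IH =>
    intro hcl
    match t, hlen with
    | [], hlen => simp [pvEnc, pvSub, pv_replace_nil _ _ pv_PH_ne]
    | [a], hlen =>
      rw [pv_enc_one, pv_sub_one,
        pv_replace_neg _ _ _ _ pv_PH_ne (pv_npPH _ _ (hcl a (by simp)).1),
        pv_replace_nil _ _ pv_PH_ne]
    | [a, b], hlen =>
      rw [pv_enc_two, pv_sub_two,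
        pv_replace_neg _ _ _ _ pv_PH_ne (pv_npPH _ _ (hcl a (by simp)).1),
        pv_replace_neg _ _ _ _ pv_PH_ne (pv_npPH _ _ (hcl b (by simp)).1),
        pv_replace_nil _ _ pv_PH_ne]
    | a :: b :: c :: r, hlen =>
      have hlr : r.length + 3 = n := by simpa using hlen
      have hcl3 : pvClean (b :: c :: r) := fun d hd => hcl d (List.mem_cons_of_mem _ hd)
      have hclr : pvClean r := fun d hd => hcl d (by simp [hd])
      by_cases hg : [a, b] ∈ pvStems ∧ c = '-'
      · obtain ⟨hm, rfl⟩ := hg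
        rw [pv_enc_pos _ _ _ _ hm, pv_sub_pos _ _ _ hm]
        show PySem.Chars.replace ('\x00' :: 'A' :: 'L' :: '\x00' :: a :: b :: '\x01' :: pvEnc pvStems r) _ _ = _
        rw [pv_replace_pos _ _ _ pv_PH_ne (by simp [pvPlaceholder, List.isPrefixOf]) (by simp)]
        rw [show List.drop pvPlaceholder.length
              ('\x00' :: 'A' :: 'L' :: '\x00' :: a :: b :: '\x01' :: pvEnc pvStems r)
            = a :: b :: '\x01' :: pvEnc pvStems r from by simp [pvPlaceholder]]
        simp only [List.nil_append]
        rw [pv_replace_neg _ _ _ _ pv_PH_ne (pv_npPH _ _ (hcl a (by simp)).1),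
          pv_replace_neg _ _ _ _ pv_PH_ne (pv_npPH _ _ (hcl b (by simp)).1),
          pv_replace_neg _ _ _ _ pv_PH_ne (pv_npPH _ _ (by decide)),
          IH r.length (by omega) r rfl hclr]
      · rw [pv_enc_neg _ _ _ _ _ hg, pv_sub_neg _ _ _ _ hg,
          pv_replace_neg _ _ _ _ pv_PH_ne (pv_npPH _ _ (hcl a (by simp)).1),
          IH (b :: c :: r).length (by simp; omega) _ rfl hcl3]

lemma pv_SOH_ne : (['\x01'] : List Char) ≠ [] := by simp

lemma pv_restore2 : ∀ t : List Char, pvClean t →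
    PySem.Chars.replace (pvSub t) ['\x01'] ['-'] = t := by
  intro t
  induction hlen : t.length using Nat.strong_induction_on generalizing t with
  | _ n IH =>
    intro hcl
    match t, hlen with
    | [], hlen => simp [pvSub, pv_replace_nil _ _ pv_SOH_ne]
    | [a], hlen =>
      rw [pv_sub_one, pv_replace_neg _ _ _ _ pv_SOH_ne (pv_npSOH _ _ (hcl a (by simp)).2),
        pv_replace_nil _ _ pv_SOH_ne]
    | [a, b], hlen =>
      rw [pv_sub_two, pv_replace_neg _ _ _ _ pv_SOH_ne (pv_npSOH _ _ (hcl a (by simp)).2),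
        pv_replace_neg _ _ _ _ pv_SOH_ne (pv_npSOH _ _ (hcl b (by simp)).2),
        pv_replace_nil _ _ pv_SOH_ne]
    | a :: b :: c :: r, hlen =>
      have hlr : r.length + 3 = n := by simpa using hlen
      have hcl3 : pvClean (b :: c :: r) := fun d hd => hcl d (List.mem_cons_of_mem _ hd)
      have hclr : pvClean r := fun d hd => hcl d (by simp [hd])
      by_cases hg : [a, b] ∈ pvStems ∧ c = '-'
      · obtain ⟨hm, rfl⟩ := hg
        rw [pv_sub_pos _ _ _ hm,
          pv_replace_neg _ _ _ _ pv_SOH_ne (pv_npSOH _ _ (hcl a (by simp)).2),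
          pv_replace_neg _ _ _ _ pv_SOH_ne (pv_npSOH _ _ (hcl b (by simp)).2),
          pv_replace_pos _ _ _ pv_SOH_ne (by simp [List.isPrefixOf]) (by simp)]
        simp only [List.length_singleton, List.drop_succ_cons, List.drop_zero]
        rw [IH r.length (by omega) r rfl hclr]
        simp
      · rw [pv_sub_neg _ _ _ _ hg,
          pv_replace_neg _ _ _ _ pv_SOH_ne (pv_npSOH _ _ (hcl a (by simp)).2),
          IH (b :: c :: r).length (by simp; omega) _ rfl hcl3]

-- strip-emptiness is invariant under pvEnc
lemma pv_dropWhile_forall (p : Char → Bool) : ∀ l : List Char,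
    ((∀ c ∈ l.dropWhile p, p c = true) ↔ ∀ c ∈ l, p c = true) := by
  intro l
  induction l with
  | nil => simp
  | cons c t ih =>
    by_cases hc : p c = true
    · rw [List.dropWhile_cons_of_pos hc]
      simp [hc, ih]
    · rw [List.dropWhile_cons_of_neg hc]

lemma pv_strip_nil_iff (s : List Char) :
    PySem.Chars.strip s = [] ↔ ∀ c ∈ s, PySem.Chars.isspace c = true := by
  rw [PySem.Chars.strip, PySem.Chars.rstrip, PySem.Chars.lstrip]
  rw [List.reverse_eq_nil_iff, List.dropWhile_eq_nil_iff]
  constructor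
  · intro h
    rw [← pv_dropWhile_forall PySem.Chars.isspace s]
    intro d hd
    exact h d (by simpa using hd)
  · intro h x hx
    have hx' : x ∈ List.dropWhile PySem.Chars.isspace s := by simpa using hx
    exact h x (List.dropWhile_subset _ hx')

lemma pv_allspace_enc : ∀ t : List Char,
    (∀ c ∈ pvEnc pvStems t, PySem.Chars.isspace c = true) ↔
      (∀ c ∈ t, PySem.Chars.isspace c = true) := by
  intro t
  induction hlen : t.length using Nat.strong_induction_on generalizing t with
  | _ n IH =>
    match t, hlen with
    | [], hlen => simp [pvEnc]
    | [a], hlen => rw [pv_enc_one]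
    | [a, b], hlen => rw [pv_enc_two]
    | a :: b :: c :: r, hlen =>
      have hlr : r.length + 3 = n := by simpa using hlen
      by_cases hg : [a, b] ∈ pvStems ∧ c = '-'
      · obtain ⟨hm, rfl⟩ := hg
        rw [pv_enc_pos _ _ _ _ hm]
        constructor
        · intro h
          exact absurd (h 'A' (by simp [pvMark])) (by decide)
        · intro h
          exact absurd (h '-' (by simp)) (by decide)
      · rw [pv_enc_neg _ _ _ _ _ hg]
        simp only [List.forall_mem_cons]
        exact and_congr_right fun _ => by
          have := IH (b :: c :: r).length (by simp; omega) _ rfl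
          simpa using this

lemma pv_strip_enc (t : List Char) :
    (PySem.Chars.strip (pvEnc pvStems t)).isEmpty = (PySem.Chars.strip t).isEmpty := by
  rw [Bool.eq_iff_iff, List.isEmpty_iff, List.isEmpty_iff, pv_strip_nil_iff, pv_strip_nil_iff]
  exact pv_allspace_enc t

-- ===== VERDICT (by name: the statement is the Claim_ definition above) =====
theorem split_preserving_al_py_spec : Claim_equal_split_preserving_al_py := by
  intro text hdom
  have hcl : pvClean text.toList := by
    intro c hc
    have hall : pvDomChar c = true := by
      unfold Dom_split_preserving_al_py pvDomStr at hdom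
      exact (List.all_eq_true.mp hdom) c hc
    constructor <;> rintro rfl <;> simp [pvDomChar] at hall
  unfold Spec_split_preserving_al_py
  simp only [split_preserving_al_py, split_preserving_al_py_alt]
  rw [pv_chain _ hcl, pv_splitOn_eq, pv_core]
  have hfun : (fun (res : List (List Char)) part =>
      if (PySem.Chars.strip part).isEmpty then res
      else res ++ [PySem.Chars.replace (PySem.Chars.replace part pvPlaceholder []) ['\x01'] ['-']])
    = (fun res part =>
      if (!(PySem.Chars.strip part).isEmpty) = true
      then res ++ [PySem.Chars.replace (PySem.Chars.replace part pvPlaceholder []) ['\x01'] ['-']]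
      else res) := by
    funext res part
    by_cases h : (PySem.Chars.strip part).isEmpty <;> simp [h]
  rw [hfun, PySem.List.foldl_append_if]
  simp only [List.nil_append]
  rw [List.filter_map]
  have hfc : ∀ t ∈ pvAltScan [] text.toList,
      ((fun x => !(PySem.Chars.strip x).isEmpty) ∘ pvEnc pvStems) t
        = (fun x => !(PySem.Chars.strip x).isEmpty) t := by
    intro t ht
    simp only [Function.comp_apply, pv_strip_enc t]
  rw [List.filter_congr hfc]
  rw [List.map_map, List.map_map]
  have hrt : ∀ t ∈ (pvAltScan [] text.toList).filter (fun x => !(PySem.Chars.strip x).isEmpty),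
      ((String.ofList ∘ fun part =>
          PySem.Chars.replace (PySem.Chars.replace part pvPlaceholder []) ['\x01'] ['-'])
        ∘ pvEnc pvStems) t = String.ofList t := by
    intro t ht
    have htok : t ∈ pvAltScan [] text.toList := List.mem_of_mem_filter ht
    have hclt : pvClean t :=
      pv_tok_chars (fun c => c ≠ '\x00' ∧ c ≠ '\x01') text.toList [] (by simp) hcl t htok
    simp only [Function.comp_apply]
    rw [pv_restore1 t hclt, pv_restore2 t hclt]
  rw [List.map_congr_left hrt]
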